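-- pv_equiv track=rewrite | github.com/induction-labs/induction-labs | repos/synth/src/synth/recordings/synth_captions_post_process.py | format_actions_and_thinking
-- ===== SOURCE A (Python) =====
-- def format_actions_and_thinking(actions, good_thinking, thinking):
--     assert len(good_thinking) + len(thinking) == len(actions), (
--         "Mismatch in lengths of good_actions, actions, and thinking"
--     )
--
--     formatted_actions_and_thinking = ""
--     for i, (action, thinking) in enumerate(
--         zip(actions, good_thinking + thinking, strict=False)
--     ):
--         is_good_thinking = i < len(good_thinking)
--         thinking_tag = "Thinking:" if is_good_thinking else "Rough Thinking:"
--         formatted_actions_and_thinking += (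
--             f"**Step {i + 1}**\n{thinking_tag} {thinking}\nAction: {action}\n\n"
--         )
--
--     return formatted_actions_and_thinking.strip()
-- ===== SOURCE B (Python) =====
-- def format_actions_and_thinking(actions, good_thinking, thinking):
--     assert len(good_thinking) + len(thinking) == len(actions), (
--         "Mismatch in lengths of good_actions, actions, and thinking"
--     )
--     parts = [f"**Step {i + 1}**\nThinking: {t}\nAction: {a}"
--              for i, (t, a) in enumerate(zip(good_thinking, actions))]
--     n = len(parts)
--     parts += [f"**Step {n + i + 1}**\nRough Thinking: {t}\nAction: {a}"
--               for i, (t, a) in enumerate(zip(thinking, actions[n:]))]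
--     return "\n\n".join(parts).strip()
-- ===== Notes on version B (the rewrite author's own statement) =====
-- stated objective: idiomatic
-- what changed: Replaces A's single fold with a per-iteration tag branch and repeated string += by two labelled list comprehensions (good segment, then rough segment over the remaining actions) joined once with ' '.
import Mathlib
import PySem

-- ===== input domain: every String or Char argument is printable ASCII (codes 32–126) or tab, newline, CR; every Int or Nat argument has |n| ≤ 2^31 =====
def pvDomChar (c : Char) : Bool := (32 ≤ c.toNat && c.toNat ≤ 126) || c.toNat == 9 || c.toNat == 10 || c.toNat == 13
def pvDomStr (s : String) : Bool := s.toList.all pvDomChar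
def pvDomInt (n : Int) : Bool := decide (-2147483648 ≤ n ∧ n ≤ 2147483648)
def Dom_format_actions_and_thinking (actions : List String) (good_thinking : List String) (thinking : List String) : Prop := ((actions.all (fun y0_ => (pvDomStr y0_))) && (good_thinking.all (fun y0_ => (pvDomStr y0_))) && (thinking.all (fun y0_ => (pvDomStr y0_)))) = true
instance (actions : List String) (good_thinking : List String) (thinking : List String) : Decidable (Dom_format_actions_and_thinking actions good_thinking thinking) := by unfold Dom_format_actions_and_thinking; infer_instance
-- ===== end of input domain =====

-- B replaces A's single tag-branching fold with repeated `+=` by two labelled list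
-- comprehensions joined once with "\n\n" (objective: idiomatic); equal output proved on all length-matched inputs.


-- ===== PORT A =====
-- Port of A: one fold over enumerate(zip(actions, good_thinking + thinking)), appending
-- an f-string per step (tag chosen by i < len(good_thinking)), then .strip().
def format_actions_and_thinking (actions : List String) (good_thinking : List String) (thinking : List String) : String :=
  PySem.Str.strip
    ((PySem.List.enumerate (actions.zip (good_thinking ++ thinking))).foldl
      (fun acc p =>
        let thinking_tag := if p.1 < (good_thinking.length : Int) then "Thinking:" else "Rough Thinking:"
        acc ++ ("**Step " ++ PySem.Int.toStr (p.1 + 1) ++ "**\n" ++ thinking_tag ++ " " ++ p.2.2 ++ "\nAction: " ++ p.2.1 ++ "\n\n"))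
      "")

-- ===== PORT B =====
-- Port of B: two labelled comprehensions (good segment, then rough segment over the
-- remaining actions), joined with "\n\n" and stripped.
def format_actions_and_thinking_alt (actions : List String) (good_thinking : List String) (thinking : List String) : String :=
  let goodParts := (PySem.List.enumerate (good_thinking.zip actions)).map
    (fun p => "**Step " ++ PySem.Int.toStr (p.1 + 1) ++ "**\nThinking: " ++ p.2.1 ++ "\nAction: " ++ p.2.2)
  let n := goodParts.length
  let roughParts := (PySem.List.enumerate (thinking.zip (PySem.List.slice actions (some (n : Int)) none))).map
    (fun p => "**Step " ++ PySem.Int.toStr ((n : Int) + p.1 + 1) ++ "**\nRough Thinking: " ++ p.2.1 ++ "\nAction: " ++ p.2.2)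
  PySem.Str.strip (PySem.Str.join "\n\n" (goodParts ++ roughParts))

-- ===== PRECONDITION & SPEC =====
-- Pre_ excludes exactly the inputs on which A's assert fails (AssertionError): the lengths must match.
def Pre_format_actions_and_thinking (actions : List String) (good_thinking : List String) (thinking : List String) : Prop :=
  good_thinking.length + thinking.length = actions.length
instance (actions : List String) (good_thinking : List String) (thinking : List String) : Decidable (Pre_format_actions_and_thinking actions good_thinking thinking) := by unfold Pre_format_actions_and_thinking; infer_instance
def pvWitness_format_actions_and_thinking : List String × List String × List String :=
  (["click A", "scroll down"], ["plan the click"], ["rough scroll idea"])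
def Spec_format_actions_and_thinking (actions : List String) (good_thinking : List String) (thinking : List String) (out : String) : Prop := out = format_actions_and_thinking_alt actions good_thinking thinking
instance (actions : List String) (good_thinking : List String) (thinking : List String) (out : String) : Decidable (Spec_format_actions_and_thinking actions good_thinking thinking out) := by unfold Spec_format_actions_and_thinking; infer_instance

-- ===== CLAIM (what is proved, stated in full; the proofs are below) =====
def Claim_equal_format_actions_and_thinking : Prop := ∀ (actions : List String) (good_thinking : List String) (thinking : List String), Dom_format_actions_and_thinking actions good_thinking thinking → Pre_format_actions_and_thinking actions good_thinking thinking → Spec_format_actions_and_thinking actions good_thinking thinking (format_actions_and_thinking actions good_thinking thinking)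

-- ===== LEMMAS AND PROOFS =====

-- A's `+=` loop, as a flatten of per-step strings.
theorem pvFoldlStrToList {α : Type} (l : List α) (f : α → String) (init : String) :
    (l.foldl (fun acc x => acc ++ f x) init).toList
      = init.toList ++ (l.map (fun x => (f x).toList)).flatten := by
  induction l generalizing init with
  | nil => simp
  | cons a l ih => simp [ih, List.append_assoc]

theorem pvEnumerateAppend {α : Type} (xs ys : List α) (s : Int) :
    PySem.List.enumerate (xs ++ ys) s
      = PySem.List.enumerate xs s ++ PySem.List.enumerate ys (s + xs.length) := by
  induction xs generalizing s with
  | nil => simp [PySem.List.enumerate_nil]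
  | cons a xs ih =>
      simp only [List.cons_append, PySem.List.enumerate_cons, ih, List.length_cons]
      congr 2
      push_cast
      ring_nf

theorem pvEnumerateAdd {α : Type} (xs : List α) (s d : Int) :
    PySem.List.enumerate xs (s + d)
      = (PySem.List.enumerate xs s).map (fun p => (p.1 + d, p.2)) := by
  induction xs generalizing s with
  | nil => simp
  | cons a xs ih =>
      simp only [PySem.List.enumerate_cons, List.map_cons]
      refine congrArg₂ _ rfl ?_
      rw [show s + d + 1 = (s + 1) + d by ring, ih]

theorem pvEnumerateMap {α β : Type} (h : α → β) (xs : List α) (s : Int) :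
    PySem.List.enumerate (xs.map h) s
      = (PySem.List.enumerate xs s).map (fun p => (p.1, h p.2)) := by
  induction xs generalizing s with
  | nil => simp
  | cons a xs ih => simp [PySem.List.enumerate_cons, ih]

theorem pvEnumerateFstBounds {α : Type} (xs : List α) (s : Int) (p : Int × α)
    (hp : p ∈ PySem.List.enumerate xs s) : s ≤ p.1 ∧ p.1 < s + xs.length := by
  induction xs generalizing s with
  | nil => simp [PySem.List.enumerate_nil] at hp
  | cons a xs ih =>
      rw [PySem.List.enumerate_cons] at hp
      rcases List.mem_cons.mp hp with h | h
      · subst h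
        constructor
        · simp
        · simp only [List.length_cons]
          push_cast
          omega
      · have := ih (s + 1) h
        simp only [List.length_cons]
        push_cast
        omega

theorem pvZipTake {α β : Type} (g : List α) (l : List β) :
    g.zip (l.take g.length) = g.zip l := by
  induction g generalizing l with
  | nil => simp
  | cons a g ih => cases l with
    | nil => simp
    | cons b l => simp [ih]

theorem pvDropWhileAll (w : List Char) (hw : w.all PySem.Chars.isspace) :
    List.dropWhile PySem.Chars.isspace w = [] := by
  rw [List.dropWhile_eq_nil_iff]
  intro x hx
  exact (List.all_eq_true.mp hw) x hx

theorem pvRstripAppendWs (x w : List Char) (hw : w.all PySem.Chars.isspace) :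
    PySem.Chars.rstrip (x ++ w) = PySem.Chars.rstrip x := by
  simp only [PySem.Chars.rstrip, List.reverse_append, List.dropWhile_append,
    pvDropWhileAll w.reverse (by simpa using hw), List.isEmpty_nil]
  simp

theorem pvStripAppendWs (s w : List Char) (hw : w.all PySem.Chars.isspace) :
    PySem.Chars.strip (s ++ w) = PySem.Chars.strip s := by
  simp only [PySem.Chars.strip, PySem.Chars.lstrip, List.dropWhile_append]
  split_ifs with h
  · simp [pvDropWhileAll w hw, List.isEmpty_iff.mp h]
  · exact pvRstripAppendWs _ w hw

theorem pvIntercalateCons (sep a b : List Char) (l : List (List Char)) :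
    sep.intercalate (a :: b :: l) = a ++ sep ++ sep.intercalate (b :: l) := by
  simp [List.intercalate, List.intersperse]

theorem pvFlattenMapSep (sep : List Char) (parts : List (List Char)) (h : parts ≠ []) :
    (parts.map (fun q => q ++ sep)).flatten = sep.intercalate parts ++ sep := by
  induction parts with
  | nil => exact absurd rfl h
  | cons a ps ih => cases ps with
    | nil => simp [List.intercalate]
    | cons b qs =>
        rw [pvIntercalateCons]
        have := ih (by simp)
        simp only [List.map_cons, List.flatten_cons] at this ⊢
        rw [this]
        simp [List.append_assoc]

-- strip (flatten of "part ++ sep") = strip (sep.intercalate parts), sep whitespace-only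
theorem pvStripFlattenEqStripJoin (sep : List Char) (hs : sep.all PySem.Chars.isspace)
    (L : List (List Char)) :
    PySem.Chars.strip ((L.map (fun q => q ++ sep)).flatten)
      = PySem.Chars.strip (PySem.Chars.join sep L) := by
  cases L with
  | nil => simp [PySem.Chars.join, List.intercalate]
  | cons a l =>
      rw [pvFlattenMapSep sep _ (by simp), pvStripAppendWs _ sep hs]
      rfl

theorem pvLitGood (X : List Char) :
    "**\n".toList ++ ("Thinking:".toList ++ (" ".toList ++ X)) = "**\nThinking: ".toList ++ X := by
  simp only [← List.append_assoc]
  rw [show ("**\n".toList ++ "Thinking:".toList ++ " ".toList : List Char) = "**\nThinking: ".toList from by decide]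

theorem pvLitRough (X : List Char) :
    "**\n".toList ++ ("Rough Thinking:".toList ++ (" ".toList ++ X)) = "**\nRough Thinking: ".toList ++ X := by
  simp only [← List.append_assoc]
  rw [show ("**\n".toList ++ "Rough Thinking:".toList ++ " ".toList : List Char) = "**\nRough Thinking: ".toList from by decide]

-- ===== VERDICT (by name: the statement is the Claim_ definition above) =====
set_option maxHeartbeats 1000000 in
theorem format_actions_and_thinking_spec : Claim_equal_format_actions_and_thinking := by
  intro actions g t _ hpre
  unfold Pre_format_actions_and_thinking at hpre
  unfold Spec_format_actions_and_thinking
  have hnle : g.length ≤ actions.length := by omega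
  simp only [format_actions_and_thinking, format_actions_and_thinking_alt,
    PySem.Str.strip, PySem.List.slice_from_natCast]
  congr 1
  rw [PySem.Str.toList_join, pvFoldlStrToList]
  rw [show ("".toList : List Char) = [] from rfl, List.nil_append]
  -- names for B's two part lists
  set fB1 : Int × (String × String) → String := fun p =>
    "**Step " ++ PySem.Int.toStr (p.1 + 1) ++ "**\nThinking: " ++ p.2.1 ++ "\nAction: " ++ p.2.2 with hfB1
  set fB2 : Int × (String × String) → String := fun p =>
    "**Step " ++ PySem.Int.toStr (((PySem.List.enumerate (g.zip actions)).map fB1).length + p.1 + 1) ++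
      "**\nRough Thinking: " ++ p.2.1 ++ "\nAction: " ++ p.2.2 with hfB2
  -- split A's enumerate into the good and rough segments
  have hzip : actions.zip (g ++ t)
      = (actions.take g.length).zip g ++ (actions.drop g.length).zip t := by
    conv_lhs => rw [← List.take_append_drop g.length actions]
    exact List.zip_append (by simp [hnle])
  have hlen1 : ((actions.take g.length).zip g).length = g.length := by
    simp [hnle]
  have hGP : ((PySem.List.enumerate (g.zip actions)).map fB1).length = g.length := by
    simp [PySem.List.length_enumerate]
    omega
  rw [hGP]
  rw [← pvStripFlattenEqStripJoin "\n\n".toList (by decide)]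
  congr 1
  rw [hzip, pvEnumerateAppend, hlen1, List.map_append, List.map_append, List.map_append,
    List.map_map, List.map_map]
  congr 1
  congr 1
  · -- good segment
    rw [show g.zip actions = ((actions.take g.length).zip g).map Prod.swap from by
      rw [List.zip_swap, pvZipTake], pvEnumerateMap, List.map_map]
    apply List.map_congr_left
    intro p hp
    have hb := pvEnumerateFstBounds _ _ _ hp
    rw [hlen1] at hb
    simp only [Function.comp, hfB1, Prod.swap]
    rw [if_pos (by omega)]
    simp only [String.toList_append, List.append_assoc]
    rw [pvLitGood]
  · -- rough segment
    rw [pvEnumerateAdd, List.map_map]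
    rw [show t.zip (actions.drop g.length) = ((actions.drop g.length).zip t).map Prod.swap from by
      rw [List.zip_swap], pvEnumerateMap, List.map_map]
    simp only [List.map_map]
    apply List.map_congr_left
    intro p hp
    have hb := pvEnumerateFstBounds _ _ _ hp
    simp only [Function.comp, hfB2, hGP, Prod.swap]
    rw [if_neg (by omega)]
    rw [show p.1 + (g.length : Int) + 1 = (g.length : Int) + p.1 + 1 from by ring]
    simp only [String.toList_append, List.append_assoc]
    rw [pvLitRough]
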